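-- pv_equiv track=rewrite | github.com/tpett20/LeetCode | 1672.py | maximumWealth
-- ===== SOURCE A (Python) =====
-- def maximumWealth(accounts):
--     totals = []
--     for account in accounts:
--         sum = 0
--         for i in range(len(account)):
--             sum += account[i]
--         totals.append(sum)
--     largest = totals[0]
--     for i in range(1, len(totals)):
--         if totals[i] > largest:
--             largest = totals[i]
--     return largest
-- ===== SOURCE B (Python) =====
-- def maximumWealth(accounts):
--     # Divide and conquer over the index range [lo, hi): a single row's wealth
--     # at the leaf, the max of the two halves at an internal node.
--     def go(lo, hi):
--         if hi - lo <= 1: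
--             return sum(accounts[lo])
--         mid = (lo + hi) // 2
--         left = go(lo, mid)
--         right = go(mid, hi)
--         return left if left >= right else right
--     return go(0, len(accounts))
-- ===== Notes on version B (the rewrite author's own statement) =====
-- stated objective: alternative
-- what changed: Replaces A's two sequential passes (build a totals list, then linear max-scan) by a divide-and-conquer recursion over the index range that returns a row's sum at a leaf and the max of the two halves at a node, building no totals list.
import Mathlib
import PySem

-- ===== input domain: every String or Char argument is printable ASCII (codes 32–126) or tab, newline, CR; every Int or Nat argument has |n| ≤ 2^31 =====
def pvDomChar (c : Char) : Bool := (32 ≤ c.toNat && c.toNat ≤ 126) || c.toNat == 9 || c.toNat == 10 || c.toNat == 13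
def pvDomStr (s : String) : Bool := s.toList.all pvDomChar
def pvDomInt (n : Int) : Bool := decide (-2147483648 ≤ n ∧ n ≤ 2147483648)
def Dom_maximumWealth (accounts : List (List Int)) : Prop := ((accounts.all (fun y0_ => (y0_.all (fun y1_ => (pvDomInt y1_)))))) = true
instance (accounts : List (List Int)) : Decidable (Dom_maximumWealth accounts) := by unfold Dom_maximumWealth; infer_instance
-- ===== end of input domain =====

-- B replaces A's two passes (totals list, then max-scan) by divide-and-conquer over the index range; equivalence on nonempty input (both Pythons raise IndexError on []).


-- ===== PORT A =====
-- inner loop: for i in range(len(account)): sum += account[i]  (index always in range, getD is exact)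
def pvRowSumA (account : List Int) : Int :=
  (List.range account.length).foldl (fun s i => s + account.getD i 0) 0

def maximumWealth (accounts : List (List Int)) : Int :=
  let totals := accounts.map pvRowSumA
  match totals with
  | [] => 0  -- unreachable under Pre_ (Python raises IndexError at totals[0])
  | t :: ts => ts.foldl (fun largest x => if x > largest then x else largest) t

-- ===== PORT B =====
-- go(lo, hi): leaf = sum of row lo, node = max of the two halves
def pvGoB (accounts : List (List Int)) (lo hi : Nat) : Int :=
  if hi - lo ≤ 1 then (accounts.getD lo []).sum
  else
    let mid := (lo + hi) / 2
    let left := pvGoB accounts lo mid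
    let right := pvGoB accounts mid hi
    if left ≥ right then left else right
termination_by hi - lo
decreasing_by all_goals omega

def maximumWealth_alt (accounts : List (List Int)) : Int :=
  pvGoB accounts 0 accounts.length

-- ===== PRECONDITION & SPEC =====
-- Both Pythons raise IndexError on empty accounts (A at totals[0], B at accounts[0]); excluded.
def Pre_maximumWealth (accounts : List (List Int)) : Prop := accounts ≠ []
instance (accounts : List (List Int)) : Decidable (Pre_maximumWealth accounts) := by unfold Pre_maximumWealth; infer_instance
def pvWitness_maximumWealth : List (List Int) := [[1, 2], [3]]

def Spec_maximumWealth (accounts : List (List Int)) (out : Int) : Prop := out = maximumWealth_alt accounts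
instance (accounts : List (List Int)) (out : Int) : Decidable (Spec_maximumWealth accounts out) := by unfold Spec_maximumWealth; infer_instance

-- ===== CLAIM (what is proved, stated in full; the proofs are below) =====
def Claim_equal_maximumWealth : Prop := ∀ (accounts : List (List Int)), Dom_maximumWealth accounts → Pre_maximumWealth accounts → Spec_maximumWealth accounts (maximumWealth accounts)

-- ===== LEMMAS AND PROOFS =====

-- max of a nonempty list ([] case is a junk value, never used)
def pvLM : List Int → Int
  | [] => 0
  | [a] => a
  | a :: b :: r => max a (pvLM (b :: r))

theorem pvLM_cons (a : Int) (xs : List Int) (h : xs ≠ []) : pvLM (a :: xs) = max a (pvLM xs) := by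
  cases xs with
  | nil => exact absurd rfl h
  | cons b r => rfl

theorem pvLM_append (ys : List Int) (hy : ys ≠ []) :
    ∀ xs : List Int, xs ≠ [] → pvLM (xs ++ ys) = max (pvLM xs) (pvLM ys)
  | [], hx => absurd rfl hx
  | [a], _ => by rw [List.cons_append, List.nil_append, pvLM_cons a ys hy]; rfl
  | a :: b :: r, _ => by
    rw [List.cons_append, pvLM_cons a ((b :: r) ++ ys) (by simp),
      pvLM_append ys hy (b :: r) (List.cons_ne_nil b r),
      show pvLM (a :: b :: r) = max a (pvLM (b :: r)) from rfl, max_assoc]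

theorem pvRowSumA_eq_sum (l : List Int) : pvRowSumA l = l.sum := by
  unfold pvRowSumA
  induction l using List.reverseRecOn with
  | nil => simp
  | append_singleton ys y ih =>
    have h : ∀ (acc : Int) (i : ℕ), i ∈ List.range ys.length →
        acc + (ys ++ [y]).getD i 0 = acc + ys.getD i 0 := by
      intro acc i hi
      rw [List.mem_range] at hi
      simp [List.getElem?_append_left hi, hi]
    simp only [List.length_append, List.length_cons, List.length_nil,
      List.range_succ, List.foldl_append, List.foldl_cons, List.foldl_nil]
    rw [PySem.List.foldl_congr_mem (f := fun s i => s + (ys ++ [y]).getD i 0) (g := fun s i => s + ys.getD i 0) (h := h), ih]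
    simp

-- A's max-scan computes pvLM
theorem foldl_max_eq_pvLM (t : Int) (ts : List Int) :
    ts.foldl (fun largest x => if x > largest then x else largest) t = pvLM (t :: ts) := by
  induction ts generalizing t with
  | nil => rfl
  | cons x xs ih =>
    have hif : (if x > t then x else t) = max t x := by
      by_cases h : x > t
      · rw [if_pos h, max_eq_right h.le]
      · rw [if_neg h, max_eq_left (by omega)]
    rw [List.foldl_cons, ih, hif]
    cases xs with
    | nil => simp [pvLM, max_comm]
    | cons b r =>
      rw [pvLM_cons _ _ (by simp), pvLM_cons t _ (by simp), pvLM_cons x _ (by simp), max_assoc]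

-- B's divide and conquer computes pvLM of the slice of row sums
theorem pvGoB_eq (accounts : List (List Int)) :
    ∀ n lo hi, hi - lo = n → lo < hi → hi ≤ accounts.length →
    pvGoB accounts lo hi = pvLM (((accounts.drop lo).take (hi - lo)).map List.sum) := by
  intro n
  induction n using Nat.strong_induction_on with
  | _ n ih =>
    intro lo hi hn hlt hle
    rw [pvGoB]
    by_cases h1 : hi - lo ≤ 1
    · have hhi : hi = lo + 1 := by omega
      have hlo : lo < accounts.length := by omega
      have : (accounts.drop lo).take (hi - lo) = [accounts[lo]] := by
        subst hhi
        simp [List.take_one, List.head?_drop, List.getElem?_eq_getElem hlo]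
      simp [h1, this, pvLM, List.getD, List.getElem?_eq_getElem hlo]
    · simp only [h1, if_false]
      have hmid1 : lo < (lo + hi) / 2 := by omega
      have hmid2 : (lo + hi) / 2 < hi := by omega
      generalize hmid : (lo + hi) / 2 = mid at *
      rw [ih (mid - lo) (by omega) lo mid rfl hmid1 (by omega),
          ih (hi - mid) (by omega) mid hi rfl hmid2 hle]
      have hsplit : (accounts.drop lo).take (hi - lo)
          = (accounts.drop lo).take (mid - lo) ++ ((accounts.drop mid).take (hi - mid)) := by
        have : hi - lo = (mid - lo) + (hi - mid) := by omega
        have hm : lo + (mid - lo) = mid := by omega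
        rw [this, List.take_add, List.drop_drop, hm]
      have hne1 : (accounts.drop lo).take (mid - lo) ≠ [] := by
        apply List.ne_nil_of_length_pos
        rw [List.length_take, List.length_drop]
        refine lt_min ?_ ?_ <;> omega
      have hne2 : (accounts.drop mid).take (hi - mid) ≠ [] := by
        apply List.ne_nil_of_length_pos
        rw [List.length_take, List.length_drop]
        refine lt_min ?_ ?_ <;> omega
      rw [hsplit, List.map_append, pvLM_append _ (by simpa using hne2) _ (by simpa using hne1)]
      by_cases h : pvLM (((accounts.drop mid).take (hi - mid)).map List.sum)
          ≤ pvLM (((accounts.drop lo).take (mid - lo)).map List.sum)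
      · rw [if_pos h, max_eq_left h]
      · rw [if_neg h, max_eq_right (le_of_not_ge h)]

-- ===== VERDICT (by name: the statement is the Claim_ definition above) =====
theorem maximumWealth_spec : Claim_equal_maximumWealth := by
  intro accounts _ hpre
  unfold Spec_maximumWealth maximumWealth maximumWealth_alt
  cases haccts : accounts with
  | nil => exact absurd haccts hpre
  | cons a rest =>
    have hlen : 0 < (a :: rest).length := by simp
    rw [pvGoB_eq (a :: rest) ((a :: rest).length - 0) 0 (a :: rest).length rfl hlen le_rfl]
    have hmap : ∀ l : List (List Int), l.map pvRowSumA = l.map List.sum := by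
      intro l; exact List.map_congr_left (fun x _ => pvRowSumA_eq_sum x)
    simp only [List.drop_zero, Nat.sub_zero, List.take_length, List.map_cons, hmap]
    exact foldl_max_eq_pvLM a.sum (rest.map List.sum)
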